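-- pv_equiv track=rewrite | github.com/m4urin/prefix-debiasing | src/utils/__init__.py | stack_dicts
-- ===== SOURCE A (Python) =====
-- def stack_dicts(all_dicts: list[dict]):
--     if len(all_dicts) == 0:
--         return {}
--
--     d_result = {}
--     for d in all_dicts:
--         for k in d.keys():
--             d_result[k] = []
--
--     for d in all_dicts:
--         for k in d_result.keys():
--             if k in d:
--                 d_result[k].append(d[k])
--             else:
--                 d_result[k].append(None)
--     return d_result
-- ===== SOURCE B (Python) =====
-- def stack_dicts(all_dicts: list[dict]):
--     if len(all_dicts) == 0:
--         return {}
--     # Single streaming pass with lazy padding: when a key is first seen at dict i,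
--     # its column is back-filled with i Nones; at each later occurrence the column is
--     # padded with Nones up to the current position before the value is appended.
--     # A final pass pads every column to the full length.
--     res = {}
--     for i, d in enumerate(all_dicts):
--         for k, v in d.items():
--             col = res.setdefault(k, [])
--             col.extend([None] * (i - len(col)))
--             col.append(v)
--     n = len(all_dicts)
--     for col in res.values():
--         col.extend([None] * (n - len(col)))
--     return res
-- ===== Notes on version B (the rewrite author's own statement) =====
-- stated objective: alternative
-- what changed: B replaces A's two full passes (pass 1 seeds every key of every dict with an empty list, pass 2 iterates all known keys for every dict, appending a value or None) by a single streaming pass with lazy back-padding: each key's column is created only when the key is first met and back-filled with Nones for the dicts already consumed, later occurrences pad up to the current position before appending, and one final pass pads every column to the full length; per-dict work is proportional to the dict's own items instead of the whole key set.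
import Mathlib
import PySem

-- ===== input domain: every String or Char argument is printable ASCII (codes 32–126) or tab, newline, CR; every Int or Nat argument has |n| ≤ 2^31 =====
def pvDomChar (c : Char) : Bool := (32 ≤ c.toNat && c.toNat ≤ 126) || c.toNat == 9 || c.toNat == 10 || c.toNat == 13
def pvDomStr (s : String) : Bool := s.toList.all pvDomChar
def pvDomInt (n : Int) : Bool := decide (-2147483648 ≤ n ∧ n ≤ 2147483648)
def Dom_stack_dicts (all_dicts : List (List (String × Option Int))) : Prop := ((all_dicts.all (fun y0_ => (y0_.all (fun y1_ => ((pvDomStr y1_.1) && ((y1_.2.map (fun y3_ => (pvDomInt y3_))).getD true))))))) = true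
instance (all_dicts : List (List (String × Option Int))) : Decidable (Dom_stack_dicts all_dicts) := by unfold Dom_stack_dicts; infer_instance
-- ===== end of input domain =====

-- B replaces A's two full passes (seed every key with [], then append one entry per dict to
-- every column) by ONE streaming pass with lazy back-padding plus a final pad-to-length pass.

-- ===== PORT A =====
def stack_dicts (all_dicts : List (List (String × Option Int))) : List (String × List (Option Int)) :=
  if all_dicts.length = 0 then []
  else
    -- for d in all_dicts: for k in d.keys(): d_result[k] = []
    let d_result : PySem.Dict String (List (Option Int)) :=
      all_dicts.foldl (fun acc d =>
        ((PySem.Dict.ofList d).keys).foldl (fun acc2 k => acc2.insert k []) acc)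
        PySem.Dict.empty
    -- for d in all_dicts: for k in d_result.keys(): append d[k] or None
    let d_result2 : PySem.Dict String (List (Option Int)) :=
      all_dicts.foldl (fun acc d =>
        let dd := PySem.Dict.ofList d
        acc.keys.foldl (fun acc2 k =>
          if dd.contains k then acc2.modify k [] (fun xs => xs ++ [dd.getD k none])
          else acc2.modify k [] (fun xs => xs ++ [none])) acc)
        d_result
    d_result2.items

-- ===== PORT B =====
def stack_dicts_alt (all_dicts : List (List (String × Option Int))) : List (String × List (Option Int)) :=
  if all_dicts.length = 0 then []
  else
    -- for i, d in enumerate(all_dicts): for k, v in d.items():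
    --   col = res.setdefault(k, []); col.extend([None]*(i-len(col))); col.append(v)
    -- (setdefault + in-place mutation of the shared list object = one insert of the new
    --  column: a new key appends at the end, an existing key keeps its position — exact)
    let res : PySem.Dict String (List (Option Int)) :=
      (PySem.List.enumerate all_dicts 0).foldl (fun acc p =>
        ((PySem.Dict.ofList p.2).items).foldl (fun acc2 kv =>
          acc2.insert kv.1
            (acc2.getD kv.1 [] ++ List.replicate (p.1.toNat - (acc2.getD kv.1 []).length) none
              ++ [kv.2])) acc)
        PySem.Dict.empty
    -- n = len(all_dicts); for col in res.values(): col.extend([None]*(n-len(col)))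
    let n := all_dicts.length
    res.items.map (fun kc => (kc.1, kc.2 ++ List.replicate (n - kc.2.length) none))

-- ===== PRECONDITION & SPEC =====
def Spec_stack_dicts (all_dicts : List (List (String × Option Int))) (out : List (String × List (Option Int))) : Prop := out = stack_dicts_alt all_dicts
instance (all_dicts : List (List (String × Option Int))) (out : List (String × List (Option Int))) : Decidable (Spec_stack_dicts all_dicts out) := by unfold Spec_stack_dicts; infer_instance

-- ===== CLAIM (what is proved, stated in full; the proofs are below) =====
def Claim_equal_stack_dicts : Prop := ∀ (all_dicts : List (List (String × Option Int))), Dom_stack_dicts all_dicts → Spec_stack_dicts all_dicts (stack_dicts all_dicts)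

-- ===== LEMMAS AND PROOFS =====

-- the entry of key k's column contributed by dict d
def pvCol (d : List (String × Option Int)) (k : String) : Option Int :=
  if (PySem.Dict.ofList d).contains k then (PySem.Dict.ofList d).getD k none else none

-- ---------- A-side characterisation ----------

-- phase-1 inner loop: getD stays []
theorem pvP1InnerGetD (K : List String) (a : PySem.Dict String (List (Option Int)))
    (h : ∀ j, a.getD j [] = []) (j : String) :
    (K.foldl (fun acc2 k => acc2.insert k []) a).getD j [] = [] := by
  induction K generalizing a with
  | nil => exact h j
  | cons k K ih =>
      simp only [List.foldl_cons]
      refine ih _ (fun j' => ?_)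
      rw [PySem.Dict.getD_insert]
      split <;> simp [h]

-- phase 1: getD is [] everywhere
theorem pvP1GetD (ds : List (List (String × Option Int)))
    (a : PySem.Dict String (List (Option Int))) (h : ∀ j, a.getD j [] = []) (j : String) :
    (ds.foldl (fun acc d => ((PySem.Dict.ofList d).keys).foldl (fun acc2 k => acc2.insert k []) acc) a).getD j [] = [] := by
  induction ds generalizing a with
  | nil => exact h j
  | cons d ds ih => exact ih _ (pvP1InnerGetD _ _ h)

-- phase 1: keys are the ordered union of the dicts' keys
theorem pvP1Keys (ds : List (List (String × Option Int)))
    (a : PySem.Dict String (List (Option Int))) :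
    (ds.foldl (fun acc d => ((PySem.Dict.ofList d).keys).foldl (fun acc2 k => acc2.insert k []) acc) a).keys
      = PySem.Set.update a.keys (ds.flatMap (fun d => (PySem.Dict.ofList d).keys)) := by
  induction ds generalizing a with
  | nil => simp [PySem.Set.update]
  | cons d ds ih =>
      simp only [List.foldl_cons, List.flatMap_cons]
      rw [ih, PySem.Dict.keys_foldl_insert (f := fun _ _ => [])]
      simp [PySem.Set.update, List.foldl_append]

theorem pvP1Nodup (ds : List (List (String × Option Int)))
    (a : PySem.Dict String (List (Option Int))) (h : a.keys.Nodup) :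
    (ds.foldl (fun acc d => ((PySem.Dict.ofList d).keys).foldl (fun acc2 k => acc2.insert k []) acc) a).keys.Nodup := by
  induction ds generalizing a with
  | nil => exact h
  | cons d ds ih =>
      exact ih _ (PySem.Dict.nodup_keys_foldl_insert _ (fun _ _ => []) _ h)

-- phase-2 inner loop over a Nodup key list all present in the dict
theorem pvP2Inner (v : String → Option Int) (K : List String)
    (a : PySem.Dict String (List (Option Int))) (hK : K.Nodup)
    (hsub : ∀ k ∈ K, k ∈ a.keys) :
    (K.foldl (fun acc2 k => acc2.modify k [] (fun xs => xs ++ [v k])) a).keys = a.keys ∧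
    ∀ j, (K.foldl (fun acc2 k => acc2.modify k [] (fun xs => xs ++ [v k])) a).getD j []
        = if j ∈ K then a.getD j [] ++ [v j] else a.getD j [] := by
  induction K generalizing a with
  | nil => simp
  | cons k K ih =>
      simp only [List.foldl_cons]
      have hka : k ∈ a.keys := hsub k (by simp)
      have hkeys1 : (a.modify k [] (fun xs => xs ++ [v k])).keys = a.keys := by
        rw [PySem.Dict.keys_modify, PySem.Dict.keys_insert_of_contains]
        rw [PySem.Dict.contains_eq_decide_mem_keys]; simpa
      have hnd : K.Nodup := (List.nodup_cons.mp hK).2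
      have hknotK : k ∉ K := (List.nodup_cons.mp hK).1
      obtain ⟨ih1, ih2⟩ := ih (a.modify k [] (fun xs => xs ++ [v k])) hnd
        (fun k' hk' => by rw [hkeys1]; exact hsub k' (by simp [hk']))
      refine ⟨by rw [ih1, hkeys1], fun j => ?_⟩
      rw [ih2 j, PySem.Dict.getD_modify]
      by_cases hjk : j = k
      · subst hjk
        simp [hknotK]
      · simp [hjk, List.mem_cons]

-- phase 2: keys unchanged, each present key's value gains one column entry per dict
theorem pvP2 (ds : List (List (String × Option Int)))
    (a : PySem.Dict String (List (Option Int))) (h : a.keys.Nodup) :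
    (ds.foldl (fun acc d =>
        let dd := PySem.Dict.ofList d
        acc.keys.foldl (fun acc2 k =>
          if dd.contains k then acc2.modify k [] (fun xs => xs ++ [dd.getD k none])
          else acc2.modify k [] (fun xs => xs ++ [none])) acc) a).keys = a.keys ∧
    ∀ j ∈ a.keys,
      (ds.foldl (fun acc d =>
        let dd := PySem.Dict.ofList d
        acc.keys.foldl (fun acc2 k =>
          if dd.contains k then acc2.modify k [] (fun xs => xs ++ [dd.getD k none])
          else acc2.modify k [] (fun xs => xs ++ [none])) acc) a).getD j []
        = a.getD j [] ++ ds.map (fun d => pvCol d j) := by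
  induction ds generalizing a with
  | nil => simp
  | cons d ds ih =>
      simp only [List.foldl_cons]
      have hstep : (fun (acc2 : PySem.Dict String (List (Option Int))) (k : String) =>
            if (PySem.Dict.ofList d).contains k then acc2.modify k [] (fun xs => xs ++ [(PySem.Dict.ofList d).getD k none])
            else acc2.modify k [] (fun xs => xs ++ [none]))
          = fun acc2 k => acc2.modify k [] (fun xs => xs ++ [pvCol d k]) := by
        funext acc2 k
        by_cases hc : (PySem.Dict.ofList d).contains k <;> simp [pvCol, hc]
      rw [hstep]
      obtain ⟨h1, h2⟩ := pvP2Inner (pvCol d) a.keys a h (fun k hk => hk)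
      obtain ⟨ih1, ih2⟩ := ih _ (by rw [h1]; exact h)
      rw [h1] at ih1 ih2
      refine ⟨ih1, fun j hj => ?_⟩
      rw [ih2 j hj, h2 j]
      simp [hj]

-- ---------- B-side characterisation ----------

-- B's inner step at position i
def pvBStep (i : Nat) (acc2 : PySem.Dict String (List (Option Int))) (kv : String × Option Int) :
    PySem.Dict String (List (Option Int)) :=
  acc2.insert kv.1
    (acc2.getD kv.1 [] ++ List.replicate (i - (acc2.getD kv.1 []).length) none ++ [kv.2])

-- keys not named by any pair of L are untouched by the inner loop
theorem pvBInnerAbsent (i : Nat) (L : List (String × Option Int))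
    (a : PySem.Dict String (List (Option Int))) (j : String) (hj : ∀ v, (j, v) ∉ L) :
    (L.foldl (pvBStep i) a).getD j [] = a.getD j [] := by
  induction L generalizing a with
  | nil => rfl
  | cons kv L ih =>
      simp only [List.foldl_cons]
      rw [ih _ (fun v hv => hj v (by simp [hv]))]
      have hne : j ≠ kv.1 := by
        intro h
        exact hj kv.2 (by simp [h])
      exact PySem.Dict.getD_insert_of_ne _ _ _ hne

-- a key named once in L gets exactly one padded append
theorem pvBInnerPresent (i : Nat) (L : List (String × Option Int))
    (hnd : (L.map (·.1)).Nodup)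
    (a : PySem.Dict String (List (Option Int))) (j : String) (v : Option Int)
    (hv : (j, v) ∈ L) :
    (L.foldl (pvBStep i) a).getD j []
      = a.getD j [] ++ List.replicate (i - (a.getD j []).length) none ++ [v] := by
  induction L generalizing a with
  | nil => cases hv
  | cons kv L ih =>
      simp only [List.foldl_cons]
      rcases List.mem_cons.mp hv with h | h
      · subst h
        have hnotin : ∀ w, (j, w) ∉ L := by
          intro w hw
          have := (List.nodup_cons.mp hnd).1
          exact this (by simpa using List.mem_map_of_mem (f := (·.1)) hw)
        rw [pvBInnerAbsent i L _ j hnotin]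
        exact PySem.Dict.getD_insert_self _ _ _ _
      · have hjm : j ∈ L.map (·.1) := by simpa using List.mem_map_of_mem (f := (·.1)) h
        have hne : j ≠ kv.1 := by
          intro he
          exact (List.nodup_cons.mp hnd).1 (by simpa [← he] using hjm)
        rw [ih (List.nodup_cons.mp hnd).2 _ h]
        rw [show pvBStep i a kv = a.insert kv.1 (a.getD kv.1 [] ++ List.replicate (i - (a.getD kv.1 []).length) none ++ [kv.2]) from rfl]
        rw [PySem.Dict.getD_insert_of_ne _ _ _ hne]

-- inner loop over the items of dict d, summarised through pvCol
theorem pvBInner (i : Nat) (d : List (String × Option Int))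
    (a : PySem.Dict String (List (Option Int))) (j : String) :
    (((PySem.Dict.ofList d).items).foldl (pvBStep i) a).getD j []
      = if (PySem.Dict.ofList d).contains j then
          a.getD j [] ++ List.replicate (i - (a.getD j []).length) none ++ [pvCol d j]
        else a.getD j [] := by
  have hnd : (PySem.Dict.ofList d).keys.Nodup := PySem.Dict.nodup_keys_ofList d
  by_cases hc : (PySem.Dict.ofList d).contains j
  · have hiso : ((PySem.Dict.ofList d).get? j).isSome := by
      rw [← PySem.Dict.contains_eq_isSome_get?]; exact hc
    rcases Option.isSome_iff_exists.mp hiso with ⟨v, hv⟩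
    have hsome : (PySem.Dict.ofList d).get? j = some ((PySem.Dict.ofList d).getD j none) := by
      rw [hv, PySem.Dict.getD_of_get?_eq_some _ _ hv]
    have hmem : (j, (PySem.Dict.ofList d).getD j none) ∈ (PySem.Dict.ofList d).items :=
      PySem.Dict.mem_items_of_get?_eq_some _ hsome
    rw [pvBInnerPresent i _ hnd a j _ hmem]
    simp [pvCol, hc]
  · have habs : ∀ v, (j, v) ∉ (PySem.Dict.ofList d).items := by
      intro v hv
      exact hc (by
        rw [PySem.Dict.contains_eq_decide_mem_keys]
        simpa using PySem.Dict.mem_keys_of_mem_items _ hv)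
    rw [pvBInnerAbsent i _ a j habs]
    simp [hc]

-- inner-loop keys: ordered union with the dict's keys
theorem pvBInnerKeys (i : Nat) (d : List (String × Option Int))
    (a : PySem.Dict String (List (Option Int))) :
    (((PySem.Dict.ofList d).items).foldl (pvBStep i) a).keys
      = PySem.Set.update a.keys (PySem.Dict.ofList d).keys := by
  exact PySem.Dict.keys_foldl_insert_key (PySem.Dict.ofList d).items (fun kv => kv.1)
    (fun acc2 kv => acc2.getD kv.1 [] ++ List.replicate (i - (acc2.getD kv.1 []).length) none ++ [kv.2]) a

theorem pvBInnerNodup (i : Nat) (d : List (String × Option Int))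
    (a : PySem.Dict String (List (Option Int))) (h : a.keys.Nodup) :
    (((PySem.Dict.ofList d).items).foldl (pvBStep i) a).keys.Nodup :=
  PySem.Dict.nodup_keys_foldl_insert_key _ Prod.fst _ _ h

-- the streaming pass: padding each column to the current length reproduces the full columns
theorem pvBOuter (ds : List (List (String × Option Int))) (s : Nat)
    (a : PySem.Dict String (List (Option Int))) (P : String → List (Option Int))
    (hnd : a.keys.Nodup)
    (hlen : ∀ j, (a.getD j []).length ≤ s)
    (hpad : ∀ j, a.getD j [] ++ List.replicate (s - (a.getD j []).length) none = P j) :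
    ((PySem.List.enumerate ds (s : Int)).foldl
        (fun acc p => ((PySem.Dict.ofList p.2).items).foldl (pvBStep p.1.toNat) acc) a).keys
      = PySem.Set.update a.keys (ds.flatMap (fun d => (PySem.Dict.ofList d).keys)) ∧
    ((PySem.List.enumerate ds (s : Int)).foldl
        (fun acc p => ((PySem.Dict.ofList p.2).items).foldl (pvBStep p.1.toNat) acc) a).keys.Nodup ∧
    ∀ j,
      ((PySem.List.enumerate ds (s : Int)).foldl
          (fun acc p => ((PySem.Dict.ofList p.2).items).foldl (pvBStep p.1.toNat) acc) a).getD j []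
        ++ List.replicate ((s + ds.length)
            - (((PySem.List.enumerate ds (s : Int)).foldl
                (fun acc p => ((PySem.Dict.ofList p.2).items).foldl (pvBStep p.1.toNat) acc) a).getD j []).length) none
        = P j ++ ds.map (fun d => pvCol d j) := by
  induction ds generalizing s a P with
  | nil =>
      refine ⟨by simp [PySem.Set.update], hnd, fun j => ?_⟩
      simp only [PySem.List.enumerate_nil, List.foldl_nil, List.map_nil, List.append_nil]
      rw [← hpad j]
      simp
  | cons d ds ih =>
      rw [PySem.List.enumerate_cons]
      simp only [List.foldl_cons, Int.toNat_natCast]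
      set a' := ((PySem.Dict.ofList d).items).foldl (pvBStep s) a with ha'
      have hgd : ∀ j, a'.getD j [] = if (PySem.Dict.ofList d).contains j then
          a.getD j [] ++ List.replicate (s - (a.getD j []).length) none ++ [pvCol d j]
        else a.getD j [] := fun j => pvBInner s d a j
      have hnd' : a'.keys.Nodup := pvBInnerNodup s d a hnd
      have hlen' : ∀ j, (a'.getD j []).length ≤ s + 1 := by
        intro j
        rw [hgd j]
        split
        · have := hlen j
          simp only [List.length_append, List.length_replicate, List.length_cons, List.length_nil]
          omega
        · exact Nat.le_succ_of_le (hlen j)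
      have hpad' : ∀ j, a'.getD j [] ++ List.replicate ((s + 1) - (a'.getD j []).length) none
          = P j ++ [pvCol d j] := by
        intro j
        rw [hgd j]
        by_cases hc : (PySem.Dict.ofList d).contains j = true
        · rw [if_pos hc]
          have hl := hlen j
          have h0 : s + 1 - (a.getD j [] ++ List.replicate (s - (a.getD j []).length) none ++ [pvCol d j]).length = 0 := by
            simp only [List.length_append, List.length_replicate, List.length_cons, List.length_nil]
            omega
          rw [h0]
          simp [← hpad j]
        · rw [if_neg hc]
          have hl := hlen j
          have h1 : (s + 1) - (a.getD j []).length = (s - (a.getD j []).length) + 1 := by omega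
          rw [h1, List.replicate_succ']
          rw [← List.append_assoc, hpad j]
          simp [pvCol, hc]
      have hcast : ((s : Int) + 1) = ((s + 1 : Nat) : Int) := by push_cast; ring
      rw [hcast]
      obtain ⟨k1, k2, k3⟩ := ih (s + 1) a' (fun j => P j ++ [pvCol d j]) hnd' hlen' hpad'
      refine ⟨?_, k2, fun j => ?_⟩
      · rw [k1, pvBInnerKeys, List.flatMap_cons, PySem.Set.update_append]
      · have hsl : s + (d :: ds).length = (s + 1) + ds.length := by
          simp only [List.length_cons]; omega
        rw [hsl, k3 j]
        simp

-- ===== VERDICT (by name: the statement is the Claim_ definition above) =====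
theorem stack_dicts_spec : Claim_equal_stack_dicts := by
  intro all_dicts _
  unfold Spec_stack_dicts stack_dicts stack_dicts_alt
  by_cases hlen : all_dicts.length = 0
  · simp [hlen]
  · simp only [hlen, if_false]
    -- A's side: canonical form
    set r1 := all_dicts.foldl (fun acc d => ((PySem.Dict.ofList d).keys).foldl (fun acc2 k => acc2.insert k []) acc)
      (PySem.Dict.empty : PySem.Dict String (List (Option Int))) with hr1
    have hr1keys : r1.keys = PySem.Set.ofList (all_dicts.flatMap (fun d => (PySem.Dict.ofList d).keys)) := by
      rw [hr1, pvP1Keys]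
      simp [PySem.Dict.keys_empty, PySem.Set.update, PySem.Set.ofList_eq_foldl]
    have hr1nodup : r1.keys.Nodup := pvP1Nodup _ _ PySem.Dict.nodup_keys_empty
    have hr1getD : ∀ j, r1.getD j [] = [] := pvP1GetD _ _ (fun j => PySem.Dict.getD_empty j [])
    obtain ⟨h2keys, h2getD⟩ := pvP2 all_dicts r1 hr1nodup
    rw [PySem.Dict.items_eq_map_keys _ (by rw [h2keys]; exact hr1nodup) []]
    rw [h2keys, hr1keys]
    -- B's side: canonical form
    have hfun : (fun (acc : PySem.Dict String (List (Option Int))) (p : Int × List (String × Option Int)) =>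
        ((PySem.Dict.ofList p.2).items).foldl (fun acc2 kv => acc2.insert kv.1
          (acc2.getD kv.1 [] ++ List.replicate (p.1.toNat - (acc2.getD kv.1 []).length) none
            ++ [kv.2])) acc)
      = (fun acc p => ((PySem.Dict.ofList p.2).items).foldl (pvBStep p.1.toNat) acc) := rfl
    obtain ⟨b1, b2, b3⟩ := pvBOuter all_dicts 0 PySem.Dict.empty (fun _ => [])
      PySem.Dict.nodup_keys_empty (fun j => by simp [PySem.Dict.getD_empty])
      (fun j => by simp [PySem.Dict.getD_empty])
    simp only [Nat.cast_zero, Nat.zero_add] at b1 b2 b3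
    rw [hfun]
    rw [PySem.Dict.items_eq_map_keys _ b2 []]
    rw [b1]
    have hBkeys : PySem.Set.update (PySem.Dict.empty : PySem.Dict String (List (Option Int))).keys
        (all_dicts.flatMap (fun d => (PySem.Dict.ofList d).keys))
        = PySem.Set.ofList (all_dicts.flatMap (fun d => (PySem.Dict.ofList d).keys)) := by
      simp [PySem.Dict.keys_empty, PySem.Set.update, PySem.Set.ofList_eq_foldl]
    rw [hBkeys, List.map_map]
    refine (List.map_congr_left (fun k hk => ?_)).symm
    have hk' : k ∈ r1.keys := by rw [hr1keys]; exact hk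
    simp only [Function.comp]
    simp [b3 k, h2getD k hk', hr1getD k]
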